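-- pv_equiv track=rewrite | github.com/HPNow/hpnow-efficiency-analyser | fetch_sheets.py | _extract_run_metadata
-- ===== SOURCE A (Python) =====
-- def _extract_run_metadata(block_rows):
--     """
--     Extract metadata from a run's header block (the ~7 orange rows).
--     block_rows: list of raw row lists starting from the 'Initials' row.
--     """
--     meta = {}
--     for row in block_rows:
--         if not row or not row[0].strip():
--             continue
--         label = row[0].strip()
--         if label == "Initials":
--             meta["operator"] = row[2].strip() if len(row) > 2 else None
--             # Stack ID label is at col3, value at col5
--             meta["stack_id"] = (
--                 row[5].strip() if len(row) > 5 and row[5].strip() else None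
--             )
--         elif label == "Date start":
--             meta["date_start"] = row[2].strip() if len(row) > 2 else None
--             meta["aim"]        = row[5].strip() if len(row) > 5 else None
--         elif label in ("Cell area",):
--             meta["cell_area_cm2"] = row[2].strip() if len(row) > 2 else None
--             meta["n_cells"]       = row[5].strip() if len(row) > 5 else None
--         elif label.strip() in ("Current ", "Current"):
--             meta["current_mA_cm2"] = row[2].strip() if len(row) > 2 else None
--             meta["gdl"]            = row[5].strip() if len(row) > 5 else None
--         elif label == "Project":
--             meta["project"]   = row[2].strip() if len(row) > 2 else None
--             meta["foam_grid"] = row[5].strip() if len(row) > 5 else None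
--         elif label == "Cabinet":
--             meta["cabinet"]        = row[2].strip() if len(row) > 2 else None
--             meta["operation_note"] = row[5].strip() if len(row) > 5 else None
--     return meta
-- ===== SOURCE B (Python) =====
-- _FIELDS = {
--     "Initials":   [("operator", 2, False), ("stack_id", 5, True)],
--     "Date start": [("date_start", 2, False), ("aim", 5, False)],
--     "Cell area":  [("cell_area_cm2", 2, False), ("n_cells", 5, False)],
--     "Current":    [("current_mA_cm2", 2, False), ("gdl", 5, False)],
--     "Project":    [("project", 2, False), ("foam_grid", 5, False)],
--     "Cabinet":    [("cabinet", 2, False), ("operation_note", 5, False)],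
-- }
--
--
-- def _extract_run_metadata(block_rows):
--     # Stage 1: index the block by stripped label; a repeated label keeps its
--     # first position but its last row wins (plain dict overwrite semantics).
--     row_by_label = {}
--     for row in block_rows:
--         if row and row[0].strip():
--             row_by_label[row[0].strip()] = row
--     # Stage 2: emit metadata once per distinct label, driven by the field table.
--     meta = {}
--     for label, row in row_by_label.items():
--         for key, col, truthy in _FIELDS.get(label, ()):
--             val = row[col].strip() if len(row) > col else None
--             meta[key] = (val or None) if truthy else val
--     return meta
-- ===== Notes on version B (the rewrite author's own statement) =====
-- stated objective: alternative
-- what changed: Replaces A's single row pass with an elif chain writing meta directly by a two-stage pipeline: first group the rows into a last-wins dict keyed by stripped label, then emit the metadata once per distinct label from a static field table.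
import Mathlib
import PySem

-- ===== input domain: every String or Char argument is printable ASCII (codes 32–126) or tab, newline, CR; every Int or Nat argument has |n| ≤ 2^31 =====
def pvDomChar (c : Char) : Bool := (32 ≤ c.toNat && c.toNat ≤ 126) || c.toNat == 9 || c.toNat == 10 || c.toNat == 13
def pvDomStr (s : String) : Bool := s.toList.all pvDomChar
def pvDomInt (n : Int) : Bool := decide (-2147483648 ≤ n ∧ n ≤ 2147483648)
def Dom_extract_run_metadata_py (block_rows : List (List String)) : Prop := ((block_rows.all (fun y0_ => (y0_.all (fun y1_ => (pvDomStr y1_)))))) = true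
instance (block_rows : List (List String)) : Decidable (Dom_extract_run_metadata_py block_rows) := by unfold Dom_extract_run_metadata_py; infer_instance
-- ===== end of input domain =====

-- B replaces A's single pass (elif chain writing meta directly) by a two-stage pipeline:
-- group rows into a last-wins dict keyed by stripped label, then emit metadata once per
-- distinct label from a static field table (objective: alternative; return value only).

-- ===== PORT A =====
-- loop body of A's 'for row in block_rows', transliterated branch by branch
def pvStepA (acc : PySem.Dict String (Option String)) (row : List String) : PySem.Dict String (Option String) :=
  match row with
  | [] => acc
  | r0 :: _ =>
    if PySem.Str.strip r0 = "" then acc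
    else
      let label := PySem.Str.strip r0
      if label = "Initials" then
        (acc.insert "operator" (if 2 < row.length then some (PySem.Str.strip (row.getD 2 "")) else none)).insert
          "stack_id" (if 5 < row.length ∧ ¬ PySem.Str.strip (row.getD 5 "") = "" then some (PySem.Str.strip (row.getD 5 "")) else none)
      else if label = "Date start" then
        (acc.insert "date_start" (if 2 < row.length then some (PySem.Str.strip (row.getD 2 "")) else none)).insert
          "aim" (if 5 < row.length then some (PySem.Str.strip (row.getD 5 "")) else none)
      else if label = "Cell area" then
        (acc.insert "cell_area_cm2" (if 2 < row.length then some (PySem.Str.strip (row.getD 2 "")) else none)).insert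
          "n_cells" (if 5 < row.length then some (PySem.Str.strip (row.getD 5 "")) else none)
      else if PySem.Str.strip label = "Current " ∨ PySem.Str.strip label = "Current" then
        (acc.insert "current_mA_cm2" (if 2 < row.length then some (PySem.Str.strip (row.getD 2 "")) else none)).insert
          "gdl" (if 5 < row.length then some (PySem.Str.strip (row.getD 5 "")) else none)
      else if label = "Project" then
        (acc.insert "project" (if 2 < row.length then some (PySem.Str.strip (row.getD 2 "")) else none)).insert
          "foam_grid" (if 5 < row.length then some (PySem.Str.strip (row.getD 5 "")) else none)
      else if label = "Cabinet" then
        (acc.insert "cabinet" (if 2 < row.length then some (PySem.Str.strip (row.getD 2 "")) else none)).insert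
          "operation_note" (if 5 < row.length then some (PySem.Str.strip (row.getD 5 "")) else none)
      else acc

def extract_run_metadata_py (block_rows : List (List String)) : List (String × Option String) :=
  (block_rows.foldl pvStepA PySem.Dict.empty).items

-- ===== PORT B =====
-- _FIELDS table of Source B
def pvFields : PySem.Dict String (List (String × Nat × Bool)) :=
  PySem.Dict.ofList
    [ ("Initials",   [("operator", 2, false), ("stack_id", 5, true)])
    , ("Date start", [("date_start", 2, false), ("aim", 5, false)])
    , ("Cell area",  [("cell_area_cm2", 2, false), ("n_cells", 5, false)])
    , ("Current",    [("current_mA_cm2", 2, false), ("gdl", 5, false)])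
    , ("Project",    [("project", 2, false), ("foam_grid", 5, false)])
    , ("Cabinet",    [("cabinet", 2, false), ("operation_note", 5, false)]) ]

-- stage-1 loop body: row_by_label[row[0].strip()] = row
def pvGroupStep (d : PySem.Dict String (List String)) (row : List String) : PySem.Dict String (List String) :=
  match row with
  | [] => d
  | r0 :: _ => if PySem.Str.strip r0 = "" then d else d.insert (PySem.Str.strip r0) row

-- stage-2 loop body: one (label, row) item of row_by_label, inner loop over the table entries
def pvMetaStep (m : PySem.Dict String (Option String)) (e : String × List String) : PySem.Dict String (Option String) :=
  (pvFields.getD e.1 []).foldl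
    (fun m f =>
      let val := if f.2.1 < e.2.length then some (PySem.Str.strip (e.2.getD f.2.1 "")) else none
      m.insert f.1 (if f.2.2 then (if val = some "" then none else val) else val)) m

def extract_run_metadata_py_alt (block_rows : List (List String)) : List (String × Option String) :=
  ((block_rows.foldl pvGroupStep PySem.Dict.empty).items.foldl pvMetaStep PySem.Dict.empty).items

-- ===== PRECONDITION & SPEC =====
def Spec_extract_run_metadata_py (block_rows : List (List String)) (out : List (String × Option String)) : Prop := out = extract_run_metadata_py_alt block_rows
instance (block_rows : List (List String)) (out : List (String × Option String)) : Decidable (Spec_extract_run_metadata_py block_rows out) := by unfold Spec_extract_run_metadata_py; infer_instance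

-- ===== CLAIM =====
def Claim_equal_extract_run_metadata_py : Prop := ∀ (block_rows : List (List String)), Dom_extract_run_metadata_py block_rows → Spec_extract_run_metadata_py block_rows (extract_run_metadata_py block_rows)

-- ===== LEMMAS AND PROOFS =====

-- Python's str.strip is idempotent (needed because A re-strips the already-stripped label)
theorem pv_chars_strip_strip (s : List Char) :
    PySem.Chars.strip (PySem.Chars.strip s) = PySem.Chars.strip s := by
  unfold PySem.Chars.strip PySem.Chars.rstrip PySem.Chars.lstrip
  set p := PySem.Chars.isspace with hp
  set t := List.dropWhile p s with ht
  have hlt : List.dropWhile p ((List.dropWhile p t.reverse).reverse) = (List.dropWhile p t.reverse).reverse := by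
    rw [List.dropWhile_eq_self_iff]
    intro hl hpx
    have hpre : (List.dropWhile p t.reverse).reverse <+: t := by
      have := (List.dropWhile_suffix (l := t.reverse) p).reverse
      simpa using this
    have h0 : ((List.dropWhile p t.reverse).reverse)[0] = t[0]'(by
        have := hpre.length_le; simpa using lt_of_lt_of_le hl this) := hpre.getElem hl
    have htt : List.dropWhile p t = t := by rw [ht]; exact List.dropWhile_idempotent p s
    have := (List.dropWhile_eq_self_iff).1 htt (by
      have := hpre.length_le; simpa using lt_of_lt_of_le hl this)
    rw [h0] at hpx
    exact this hpx
  rw [hlt]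
  simp [List.dropWhile_idempotent]

theorem pv_str_strip_strip (s : String) :
    PySem.Str.strip (PySem.Str.strip s) = PySem.Str.strip s := by
  unfold PySem.Str.strip
  rw [String.toList_ofList, pv_chars_strip_strip]

-- table lookups of pvFields at each concrete label
theorem pvTbl1 : pvFields.getD "Initials" [] = [("operator", 2, false), ("stack_id", 5, true)] := by decide
theorem pvTbl2 : pvFields.getD "Date start" [] = [("date_start", 2, false), ("aim", 5, false)] := by decide
theorem pvTbl3 : pvFields.getD "Cell area" [] = [("cell_area_cm2", 2, false), ("n_cells", 5, false)] := by decide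
theorem pvTbl4 : pvFields.getD "Current" [] = [("current_mA_cm2", 2, false), ("gdl", 5, false)] := by decide
theorem pvTbl5 : pvFields.getD "Project" [] = [("project", 2, false), ("foam_grid", 5, false)] := by decide
theorem pvTbl6 : pvFields.getD "Cabinet" [] = [("cabinet", 2, false), ("operation_note", 5, false)] := by decide

theorem pvTbl_none (label : String)
    (h1 : label ≠ "Initials") (h2 : label ≠ "Date start") (h3 : label ≠ "Cell area")
    (h4 : label ≠ "Current") (h5 : label ≠ "Project") (h6 : label ≠ "Cabinet") :
    pvFields.getD label [] = [] := by
  rw [show pvFields = PySem.Dict.mk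
      [ ("Initials",   [("operator", 2, false), ("stack_id", 5, true)])
      , ("Date start", [("date_start", 2, false), ("aim", 5, false)])
      , ("Cell area",  [("cell_area_cm2", 2, false), ("n_cells", 5, false)])
      , ("Current",    [("current_mA_cm2", 2, false), ("gdl", 5, false)])
      , ("Project",    [("project", 2, false), ("foam_grid", 5, false)])
      , ("Cabinet",    [("cabinet", 2, false), ("operation_note", 5, false)]) ] from by decide]
  simp [PySem.Dict.getD, Ne.symm h1, Ne.symm h2,
    Ne.symm h3, Ne.symm h4, Ne.symm h5, Ne.symm h6, PySem.Dict.get?]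

-- canonical event of a row: (stripped label, row) for rows the loops do not skip
def pvCanon (row : List String) : Option (String × List String) :=
  match row with
  | [] => none
  | r0 :: _ => if PySem.Str.strip r0 = "" then none else some (PySem.Str.strip r0, row)

-- value Source B computes for one table entry f = (key, col, truthy) on a row
def pvVal (row : List String) (f : String × Nat × Bool) : Option String :=
  let val := if f.2.1 < row.length then some (PySem.Str.strip (row.getD f.2.1 "")) else none
  if f.2.2 then (if val = some "" then none else val) else val

-- the (meta key, value) pairs a label contributes from a given row
def pvPairs (lab : String) (row : List String) : List (String × Option String) :=
  (pvFields.getD lab []).map (fun f => (f.1, pvVal row f))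

def pvKeys (lab : String) : List String := (pvFields.getD lab []).map (·.1)

def pvIns (m : PySem.Dict String (Option String)) (ps : List (String × Option String)) :
    PySem.Dict String (Option String) :=
  ps.foldl (fun m p => m.insert p.1 p.2) m

def pvEv (m : PySem.Dict String (Option String)) (e : String × List String) :
    PySem.Dict String (Option String) :=
  pvIns m (pvPairs e.1 e.2)

-- row of the LAST event carrying a given label
def pvLast (evs : List (String × List String)) (lab : String) : List String :=
  ((evs.reverse.find? (fun e => e.1 == lab)).map Prod.snd).getD []

-- canonical items list: distinct labels in first-occurrence order, values from the last occurrence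
def pvCanonical (evs : List (String × List String)) : List (String × Option String) :=
  (PySem.Set.ofList (evs.map Prod.fst)).flatMap (fun lab => pvPairs lab (pvLast evs lab))

theorem pv_keys_pairs (lab : String) (row : List String) :
    (pvPairs lab row).map Prod.fst = pvKeys lab := by
  simp [pvPairs, pvKeys, List.map_map]

-- which label owns a given meta key (the 12 keys are pairwise distinct across labels)
def pvOwner (k : String) : Option String :=
  if k = "operator" ∨ k = "stack_id" then some "Initials"
  else if k = "date_start" ∨ k = "aim" then some "Date start"
  else if k = "cell_area_cm2" ∨ k = "n_cells" then some "Cell area"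
  else if k = "current_mA_cm2" ∨ k = "gdl" then some "Current"
  else if k = "project" ∨ k = "foam_grid" then some "Project"
  else if k = "cabinet" ∨ k = "operation_note" then some "Cabinet"
  else none

theorem pv_owner (lab k : String) (h : k ∈ pvKeys lab) : pvOwner k = some lab := by
  by_cases h1 : lab = "Initials"
  · subst h1; rw [pvKeys, pvTbl1] at h; simp at h; rcases h with h | h <;> subst h <;> decide
  · by_cases h2 : lab = "Date start"
    · subst h2; rw [pvKeys, pvTbl2] at h; simp at h; rcases h with h | h <;> subst h <;> decide
    · by_cases h3 : lab = "Cell area"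
      · subst h3; rw [pvKeys, pvTbl3] at h; simp at h; rcases h with h | h <;> subst h <;> decide
      · by_cases h4 : lab = "Current"
        · subst h4; rw [pvKeys, pvTbl4] at h; simp at h; rcases h with h | h <;> subst h <;> decide
        · by_cases h5 : lab = "Project"
          · subst h5; rw [pvKeys, pvTbl5] at h; simp at h; rcases h with h | h <;> subst h <;> decide
          · by_cases h6 : lab = "Cabinet"
            · subst h6; rw [pvKeys, pvTbl6] at h; simp at h; rcases h with h | h <;> subst h <;> decide
            · rw [pvKeys, pvTbl_none lab h1 h2 h3 h4 h5 h6] at h; simp at h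

-- the table entry list of a label is either empty or two entries with distinct keys
theorem pv_shape (lab : String) :
    pvFields.getD lab [] = [] ∨
      ∃ a b : String × Nat × Bool, pvFields.getD lab [] = [a, b] ∧ a.1 ≠ b.1 := by
  by_cases h1 : lab = "Initials"
  · subst h1; exact Or.inr ⟨_, _, pvTbl1, by decide⟩
  by_cases h2 : lab = "Date start"
  · subst h2; exact Or.inr ⟨_, _, pvTbl2, by decide⟩
  by_cases h3 : lab = "Cell area"
  · subst h3; exact Or.inr ⟨_, _, pvTbl3, by decide⟩
  by_cases h4 : lab = "Current"
  · subst h4; exact Or.inr ⟨_, _, pvTbl4, by decide⟩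
  by_cases h5 : lab = "Project"
  · subst h5; exact Or.inr ⟨_, _, pvTbl5, by decide⟩
  by_cases h6 : lab = "Cabinet"
  · subst h6; exact Or.inr ⟨_, _, pvTbl6, by decide⟩
  exact Or.inl (pvTbl_none lab h1 h2 h3 h4 h5 h6)

-- A's truthy stack_id expression equals Source B's generic truthy rewrite
theorem pv_truthy (row : List String) :
    (if 5 < row.length ∧ ¬ PySem.Str.strip (row.getD 5 "") = "" then some (PySem.Str.strip (row.getD 5 "")) else none)
      = pvVal row ("stack_id", 5, true) := by
  unfold pvVal
  by_cases h : 5 < row.length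
  · simp [h]
  · simp [h]

-- A's loop body is the canonical event step
theorem pv_stepA_eq (acc : PySem.Dict String (Option String)) (row : List String) :
    pvStepA acc row = (pvCanon row).elim acc (pvEv acc) := by
  cases row with
  | nil => rfl
  | cons r0 rest =>
    unfold pvStepA pvCanon
    by_cases h0 : PySem.Str.strip r0 = ""
    · simp [h0]
    · simp only [if_neg h0, Option.elim_some]
      have hss : PySem.Str.strip (PySem.Str.strip r0) = PySem.Str.strip r0 := pv_str_strip_strip r0
      by_cases h1 : PySem.Str.strip r0 = "Initials"
      · rw [h1, if_pos rfl]
        simp only [pvEv, pvPairs, pvTbl1, pvIns, List.map_cons, List.map_nil, List.foldl_cons, List.foldl_nil]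
        rw [pv_truthy]
        rfl
      · simp only [if_neg h1]
        by_cases h2 : PySem.Str.strip r0 = "Date start"
        · rw [h2]
          simp only [pvEv, pvPairs, pvTbl2, pvIns, List.map_cons, List.map_nil,
            List.foldl_cons, List.foldl_nil]
          rfl
        · simp only [if_neg h2]
          by_cases h3 : PySem.Str.strip r0 = "Cell area"
          · rw [h3]
            simp only [pvEv, pvPairs, pvTbl3, pvIns, List.map_cons, List.map_nil,
              List.foldl_cons, List.foldl_nil]
            rfl
          · simp only [if_neg h3]
            by_cases h4 : PySem.Str.strip r0 = "Current"
            · have hcur : PySem.Str.strip (PySem.Str.strip r0) = "Current " ∨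
                  PySem.Str.strip (PySem.Str.strip r0) = "Current" := Or.inr (hss.trans h4)
              rw [if_pos hcur, h4]
              simp only [pvEv, pvPairs, pvTbl4, pvIns, List.map_cons, List.map_nil,
                List.foldl_cons, List.foldl_nil]
              rfl
            · have h4' : ¬ (PySem.Str.strip (PySem.Str.strip r0) = "Current " ∨
                  PySem.Str.strip (PySem.Str.strip r0) = "Current") := by
                rw [hss]
                rintro (h | h)
                · rw [h] at hss
                  exact absurd hss (by decide)
                · exact h4 h
              simp only [if_neg h4']
              by_cases h5 : PySem.Str.strip r0 = "Project"
              · rw [h5]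
                simp only [pvEv, pvPairs, pvTbl5, pvIns, List.map_cons, List.map_nil,
                  List.foldl_cons, List.foldl_nil]
                rfl
              · simp only [if_neg h5]
                by_cases h6 : PySem.Str.strip r0 = "Cabinet"
                · rw [h6]
                  simp only [pvEv, pvPairs, pvTbl6, pvIns, List.map_cons, List.map_nil,
                    List.foldl_cons, List.foldl_nil]
                  rfl
                · simp only [if_neg h6, pvEv, pvPairs, pvTbl_none _ h1 h2 h3 h4 h5 h6, pvIns,
                    List.map_nil, List.foldl_nil]

-- B's stage-2 loop body is the same canonical event step
theorem pv_metaStep_eq : pvMetaStep = pvEv := by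
  funext m e
  simp [pvMetaStep, pvEv, pvPairs, pvIns, List.foldl_map, pvVal]

-- A's whole loop is the event fold over the canonical events
theorem pv_foldA (rows : List (List String)) (d : PySem.Dict String (Option String)) :
    rows.foldl pvStepA d = (rows.filterMap pvCanon).foldl pvEv d := by
  induction rows generalizing d with
  | nil => rfl
  | cons r rows ih =>
    rw [List.foldl_cons, pv_stepA_eq, List.filterMap_cons]
    cases h : pvCanon r with
    | none => simp [ih]
    | some e => simp [ih]

-- B's stage-1 loop is the plain insert fold over the canonical events
theorem pv_foldG (rows : List (List String)) (d : PySem.Dict String (List String)) :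
    rows.foldl pvGroupStep d = (rows.filterMap pvCanon).foldl (fun d e => d.insert e.1 e.2) d := by
  induction rows generalizing d with
  | nil => rfl
  | cons r rows ih =>
    rw [List.foldl_cons, List.filterMap_cons]
    have : pvGroupStep d r = (pvCanon r).elim d (fun e => d.insert e.1 e.2) := by
      cases r with
      | nil => rfl
      | cons r0 rest =>
        unfold pvGroupStep pvCanon
        by_cases h0 : PySem.Str.strip r0 = "" <;> simp [h0]
    rw [this]
    cases h : pvCanon r with
    | none => simp [ih]
    | some e => simp [ih]

theorem pv_last_append (evs : List (String × List String)) (e : String × List String) (lab : String) :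
    pvLast (evs ++ [e]) lab = if e.1 = lab then e.2 else pvLast evs lab := by
  unfold pvLast
  rw [List.reverse_append, List.reverse_singleton, List.singleton_append, List.find?_cons]
  by_cases h : e.1 = lab
  · simp [h]
  · have hb : (e.1 == lab) = false := by simp [h]
    simp [hb, h]

theorem pv_find_beq {α : Type} [BEq α] [LawfulBEq α] (xs : List α) (a : α) :
    a ∈ xs → xs.find? (fun x => x == a) = some a := by
  induction xs with
  | nil => intro h; simp at h
  | cons x xs ih =>
    intro h
    rw [List.find?_cons]
    by_cases hx : x = a
    · simp [hx]
    · have hb : (x == a) = false := by simp [hx]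
      rw [hb]
      exact ih (List.mem_of_ne_of_mem (fun e => hx e.symm) h)

-- keys of the canonical items
theorem pv_canonical_keys (evs : List (String × List String)) :
    (pvCanonical evs).map Prod.fst
      = (PySem.Set.ofList (evs.map Prod.fst)).flatMap pvKeys := by
  unfold pvCanonical
  rw [List.map_flatMap]
  exact List.flatMap_congr (fun lab _ => pv_keys_pairs lab _)

-- MAIN LEMMA: the event fold's items are the canonical items
theorem pv_main (evs : List (String × List String)) :
    (evs.foldl pvEv PySem.Dict.empty).items = pvCanonical evs := by
  induction evs using List.reverseRecOn with
  | nil => rfl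
  | append_singleton evs e ih =>
    rw [List.foldl_append, List.foldl_cons, List.foldl_nil]
    obtain ⟨lab, row⟩ := e
    have hkeys : (evs.foldl pvEv PySem.Dict.empty).keys
        = (PySem.Set.ofList (evs.map Prod.fst)).flatMap pvKeys := by
      show ((evs.foldl pvEv PySem.Dict.empty).items).map Prod.fst = _
      rw [ih, pv_canonical_keys]
    have hmap : (evs ++ [(lab, row)]).map Prod.fst = evs.map Prod.fst ++ [lab] := by simp
    rcases pv_shape lab with hsh | ⟨a, b, hsh, hab⟩
    · -- label contributes nothing: the step is a no-op and the canonical list is unchanged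
      have hstep : pvEv (evs.foldl pvEv PySem.Dict.empty) (lab, row) = evs.foldl pvEv PySem.Dict.empty := by
        simp [pvEv, pvPairs, hsh, pvIns]
      rw [hstep, ih]
      unfold pvCanonical
      rw [hmap, PySem.Set.ofList_append_singleton, PySem.Set.add_eq_ite]
      have hseg : ∀ l', pvPairs l' (pvLast (evs ++ [(lab, row)]) l') = pvPairs l' (pvLast evs l') := by
        intro l'
        rw [pv_last_append]
        by_cases h : lab = l'
        · subst h; simp [pvPairs, hsh]
        · simp [h]
      by_cases hm : lab ∈ PySem.Set.ofList (evs.map Prod.fst)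
      · rw [if_pos hm]
        exact (List.flatMap_congr (fun l' _ => (hseg l').symm))
      · rw [if_neg hm, List.flatMap_append]
        have : List.flatMap (fun l' => pvPairs l' (pvLast (evs ++ [(lab, row)]) l')) [lab] = [] := by
          simp [pv_last_append, pvPairs, hsh]
        rw [this, List.append_nil]
        exact (List.flatMap_congr (fun l' _ => (hseg l').symm))
    · -- label contributes the two pairs of entries a and b
      have hpairs : ∀ r, pvPairs lab r = [(a.1, pvVal r a), (b.1, pvVal r b)] := by
        intro r; simp [pvPairs, hsh]
      have hk : pvKeys lab = [a.1, b.1] := by simp [pvKeys, hsh]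
      have hstep : pvEv (evs.foldl pvEv PySem.Dict.empty) (lab, row)
          = ((evs.foldl pvEv PySem.Dict.empty).insert a.1 (pvVal row a)).insert b.1 (pvVal row b) := by
        simp [pvEv, hpairs, pvIns]
      set D := evs.foldl pvEv PySem.Dict.empty with hD
      -- key ownership: a.1 / b.1 belong to lab and to no other label
      have howna : pvOwner a.1 = some lab := pv_owner lab a.1 (by rw [hk]; simp)
      have hownb : pvOwner b.1 = some lab := pv_owner lab b.1 (by rw [hk]; simp)
      have hother : ∀ l', l' ≠ lab → ∀ p ∈ pvPairs l' (pvLast evs l'), p.1 ≠ a.1 ∧ p.1 ≠ b.1 := by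
        intro l' hne p hp
        have hpk : p.1 ∈ pvKeys l' := by
          rw [← pv_keys_pairs l' (pvLast evs l')]
          exact List.mem_map_of_mem hp
        have hown : pvOwner p.1 = some l' := pv_owner l' p.1 hpk
        constructor
        · intro h
          rw [h, howna] at hown
          exact hne (Option.some.inj hown).symm
        · intro h
          rw [h, hownb] at hown
          exact hne (Option.some.inj hown).symm
      by_cases hm : lab ∈ evs.map Prod.fst
      · -- overwrite case: both keys are present, items are map-replaced in place
        have hmS : lab ∈ PySem.Set.ofList (evs.map Prod.fst) := (PySem.Set.mem_ofList _ _).2 hm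
        have hca : D.contains a.1 = true := by
          rw [PySem.Dict.contains_eq_decide_mem_keys, hkeys]
          simp only [decide_eq_true_eq]
          exact List.mem_flatMap.2 ⟨lab, hmS, by rw [hk]; simp⟩
        have hcb : D.contains b.1 = true := by
          rw [PySem.Dict.contains_eq_decide_mem_keys, hkeys]
          simp only [decide_eq_true_eq]
          exact List.mem_flatMap.2 ⟨lab, hmS, by rw [hk]; simp⟩
        have hcb' : (D.insert a.1 (pvVal row a)).contains b.1 = true := by
          rw [PySem.Dict.contains_insert, hcb, Bool.or_true]
        rw [hstep, PySem.Dict.items_insert_of_contains _ _ hcb',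
          PySem.Dict.items_insert_of_contains _ _ hca, List.map_map, ih]
        unfold pvCanonical
        rw [hmap, PySem.Set.ofList_append_singleton, PySem.Set.add_of_mem hmS, List.map_flatMap]
        apply List.flatMap_congr
        intro l' hl'
        by_cases he : l' = lab
        · subst he
          rw [pv_last_append, if_pos rfl, hpairs, hpairs]
          have h2 : ¬ b.1 = a.1 := fun h => hab h.symm
          simp [Function.comp_def, h2, hab]
        · rw [pv_last_append, if_neg (Ne.symm he)]
          have : ∀ p ∈ pvPairs l' (pvLast evs l'),
              (fun p => if (p.1 == b.1) = true then (b.1, pvVal row b) else p)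
                ((fun p => if (p.1 == a.1) = true then (a.1, pvVal row a) else p) p) = p := by
            intro p hp
            obtain ⟨hpa, hpb⟩ := hother l' he p hp
            have ha1 : (p.1 == a.1) = false := by simp [hpa]
            have hb1 : (p.1 == b.1) = false := by simp [hpb]
            simp [ha1, hb1]
          exact (List.map_congr_left this).trans (List.map_id _)
      · -- fresh case: both keys are new, items are appended
        have hmS : lab ∉ PySem.Set.ofList (evs.map Prod.fst) := fun h => hm ((PySem.Set.mem_ofList _ _).1 h)
        have hfresh : ∀ k : String, pvOwner k = some lab → D.contains k = false := by
          intro k hk'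
          rw [PySem.Dict.contains_eq_decide_mem_keys, hkeys]
          simp only [decide_eq_false_iff_not]
          intro hmem
          obtain ⟨l', hl', hkl'⟩ := List.mem_flatMap.1 hmem
          have := pv_owner l' k hkl'
          rw [hk'] at this
          apply hmS
          rw [Option.some.inj this]
          exact hl'
        have hca : D.contains a.1 = false := hfresh a.1 howna
        have hcb : D.contains b.1 = false := hfresh b.1 hownb
        have hcb' : (D.insert a.1 (pvVal row a)).contains b.1 = false := by
          rw [PySem.Dict.contains_insert, hcb]
          simp [Ne.symm]
          exact fun h => hab h.symm
        rw [hstep, PySem.Dict.items_insert_of_not_contains _ _ hcb',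
          PySem.Dict.items_insert_of_not_contains _ _ hca, ih, List.append_assoc]
        unfold pvCanonical
        rw [hmap, PySem.Set.ofList_append_singleton, PySem.Set.add_of_not_mem hmS,
          List.flatMap_append]
        congr 1
        · apply List.flatMap_congr
          intro l' hl'
          rw [pv_last_append, if_neg]
          intro h
          apply hmS
          have h' : lab = l' := h
          rw [h']
          exact hl'
        · simp [pv_last_append, hpairs]

-- stage 1's items: distinct labels in first order, each with its last row
theorem pv_group (evs : List (String × List String)) :
    (evs.foldl (fun d (e : String × List String) => d.insert e.1 e.2) PySem.Dict.empty).items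
      = (PySem.Set.ofList (evs.map Prod.fst)).map (fun l' => (l', pvLast evs l')) := by
  induction evs using List.reverseRecOn with
  | nil => rfl
  | append_singleton evs e ih =>
    rw [List.foldl_append, List.foldl_cons, List.foldl_nil]
    obtain ⟨lab, row⟩ := e
    set G := evs.foldl (fun d (e : String × List String) => d.insert e.1 e.2) PySem.Dict.empty with hG
    have hmap : (evs ++ [(lab, row)]).map Prod.fst = evs.map Prod.fst ++ [lab] := by simp
    have hkeys : G.keys = PySem.Set.ofList (evs.map Prod.fst) := by
      show (G.items).map Prod.fst = _
      rw [ih, List.map_map]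
      exact (List.map_congr_left (fun x _ => rfl)).trans (List.map_id _)
    by_cases hm : lab ∈ evs.map Prod.fst
    · have hmS : lab ∈ PySem.Set.ofList (evs.map Prod.fst) := (PySem.Set.mem_ofList _ _).2 hm
      have hc : G.contains lab = true := by
        rw [PySem.Dict.contains_eq_decide_mem_keys, hkeys]
        simp only [decide_eq_true_eq]
        exact hmS
      rw [PySem.Dict.items_insert_of_contains _ _ hc, ih, List.map_map, hmap,
        PySem.Set.ofList_append_singleton, PySem.Set.add_of_mem hmS]
      apply List.map_congr_left
      intro l' _
      rw [pv_last_append]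
      by_cases he : lab = l'
      · subst he; simp
      · simp [he, Ne.symm he]
    · have hmS : lab ∉ PySem.Set.ofList (evs.map Prod.fst) := fun h => hm ((PySem.Set.mem_ofList _ _).1 h)
      have hc : G.contains lab = false := by
        rw [PySem.Dict.contains_eq_decide_mem_keys, hkeys]
        simp only [decide_eq_false_iff_not]
        exact hmS
      rw [PySem.Dict.items_insert_of_not_contains _ _ hc, ih, hmap,
        PySem.Set.ofList_append_singleton, PySem.Set.add_of_not_mem hmS, List.map_append]
      congr 1
      · apply List.map_congr_left
        intro l' hl'
        rw [pv_last_append, if_neg]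
        intro h
        apply hmS
        have h' : lab = l' := h
        rw [h']
        exact hl'
      · simp [pv_last_append]

-- the canonical items of the grouped (nodup-label) events are the canonical items of the events
theorem pv_canonical_group (evs : List (String × List String)) :
    pvCanonical ((PySem.Set.ofList (evs.map Prod.fst)).map (fun l' => (l', pvLast evs l')))
      = pvCanonical evs := by
  unfold pvCanonical
  have hfst : ((PySem.Set.ofList (evs.map Prod.fst)).map (fun l' => (l', pvLast evs l'))).map Prod.fst
      = PySem.Set.ofList (evs.map Prod.fst) := by
    rw [List.map_map]
    exact (List.map_congr_left (fun x _ => rfl)).trans (List.map_id _)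
  rw [hfst, PySem.Set.ofList_ofList]
  apply List.flatMap_congr
  intro l' hl'
  congr 1
  have hfind : (((PySem.Set.ofList (evs.map Prod.fst)).map (fun l'' => (l'', pvLast evs l''))).reverse.find?
      (fun e => e.1 == l')) = some (l', pvLast evs l') := by
    rw [← List.map_reverse, List.find?_map,
      show ((fun e : String × List String => e.1 == l') ∘ fun l'' => (l'', pvLast evs l''))
        = (fun x => x == l') from rfl,
      pv_find_beq _ _ (List.mem_reverse.2 hl')]
    rfl
  rw [show pvLast ((PySem.Set.ofList (evs.map Prod.fst)).map (fun l'' => (l'', pvLast evs l''))) l'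
      = (((((PySem.Set.ofList (evs.map Prod.fst)).map (fun l'' => (l'', pvLast evs l''))).reverse.find?
        (fun e => e.1 == l')).map Prod.snd).getD []) from rfl, hfind]
  rfl

-- ===== VERDICT =====
theorem extract_run_metadata_py_spec : Claim_equal_extract_run_metadata_py := by
  intro block_rows _
  unfold Spec_extract_run_metadata_py extract_run_metadata_py extract_run_metadata_py_alt
  rw [pv_foldA, pv_foldG, pv_metaStep_eq, pv_main, pv_group, pv_main, pv_canonical_group]
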